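-- pv_equiv track=rewrite | github.com/haleykong/interviews | ibm/ibm.py | longestEvenWord
-- ===== SOURCE A (Python) =====
-- def longestEvenWord(sentence):
--     """Find and return the first word in the sentence that has a length that is
--     both an even number and has the greatest length of all even-length words in
--     the sentence.
--
--     Parameters
--     ----------
--     sentence : string
--         A sentence string consisting of words separated by spaces where each
--         word is a substring that consists of English alphabetic letters only
--
--     Returns
--     -------
--     word : string
--         First word that has the greatest length of all even-length words. If no
--         even words, returns '00'
--
--     """
--     # Get length of words
--     words = sentence.split()
--     char_count = [len(word) for word in words if (len(word) % 2 == 0)]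
--
--     # No even length words
--     if len(char_count) == 0:
--         return "00"
--
--     max_count = max(char_count)
--
--     # Find first word with the longest even length
--     for word in words:
--         if len(word) == max_count:
--             return word
-- ===== SOURCE B (Python) =====
-- def longestEvenWord(sentence):
--     best = None
--     for word in sentence.split():
--         n = len(word)
--         if n % 2 == 0 and (best is None or n > len(best)):
--             best = word
--     return best if best is not None else "00"
-- ===== Notes on version B (the rewrite author's own statement) =====
-- stated objective: simpler
-- what changed: Replaced A's three passes (comprehension of even lengths, max(), then a rescan for the first word of that length) by a single pass that keeps the first word with the greatest even length seen so far (strict > preserves first-on-tie), returning '00' when none was found.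
import Mathlib
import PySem

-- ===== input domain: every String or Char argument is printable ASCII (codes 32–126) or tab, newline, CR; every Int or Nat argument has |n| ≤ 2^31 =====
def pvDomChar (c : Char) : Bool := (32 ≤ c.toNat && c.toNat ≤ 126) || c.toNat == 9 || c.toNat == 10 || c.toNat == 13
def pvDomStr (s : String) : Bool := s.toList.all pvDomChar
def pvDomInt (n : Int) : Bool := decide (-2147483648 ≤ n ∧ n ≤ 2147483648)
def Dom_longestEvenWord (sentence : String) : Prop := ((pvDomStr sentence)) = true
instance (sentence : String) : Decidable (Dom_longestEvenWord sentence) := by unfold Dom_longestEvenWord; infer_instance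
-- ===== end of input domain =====

-- B replaces A's three passes (collect the even word lengths, take max(), rescan for the first
-- word of that length) by a single pass keeping the first word with the greatest even length
-- seen so far (strict > keeps the earlier word on ties); objective: simpler.

-- ===== PORT A =====
def longestEvenWord (sentence : String) : String :=
  let words := PySem.Str.split₀ sentence
  let charCount := (words.filter (fun w => PySem.Int.mod (PySem.Str.len w) 2 == 0)).map
    (fun w => PySem.Str.len w)
  if charCount.length = 0 then "00"
  else
    match PySem.List.max? charCount (fun x => x) with
    | none => "00"  -- unreachable: charCount is nonempty here
    | some maxCount =>
      match words.find? (fun w => PySem.Str.len w == maxCount) with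
      | some w => w
      | none => "00"  -- unreachable: the Python loop always finds a word of length maxCount

-- ===== PORT B =====
-- the loop body of Source B's single pass
def lewStep (best : Option String) (word : String) : Option String :=
  if PySem.Int.mod (PySem.Str.len word) 2 == 0 &&
     (match best with
      | none => true
      | some b => decide (PySem.Str.len b < PySem.Str.len word)) then
    some word
  else best

def longestEvenWord_alt (sentence : String) : String :=
  match (PySem.Str.split₀ sentence).foldl lewStep none with
  | some b => b
  | none => "00"

-- ===== PRECONDITION & SPEC =====
def Spec_longestEvenWord (sentence : String) (out : String) : Prop := out = longestEvenWord_alt sentence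
instance (sentence : String) (out : String) : Decidable (Spec_longestEvenWord sentence out) := by unfold Spec_longestEvenWord; infer_instance

-- ===== CLAIM (what is proved, stated in full; the proofs are below) =====
def Claim_equal_longestEvenWord : Prop := ∀ (sentence : String), Dom_longestEvenWord sentence → Spec_longestEvenWord sentence (longestEvenWord sentence)

-- ===== LEMMAS AND PROOFS =====

-- A's even-length predicate and its list of even word lengths, named for the proofs
def lewP (w : String) : Bool := PySem.Int.mod (PySem.Str.len w) 2 == 0
def lewCC (ws : List String) : List Int := (ws.filter lewP).map (fun w => PySem.Str.len w)
def lewA (ws : List String) : Option String :=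
  match PySem.List.max? (lewCC ws) (fun x => x) with
  | none => none
  | some m => ws.find? (fun w => PySem.Str.len w == m)

lemma lew_len (s : String) : PySem.Str.len s = (s.length : Int) := by simp

lemma lewP_iff (w : String) : lewP w = true ↔ PySem.Int.mod (PySem.Str.len w) 2 = 0 := by
  simp [lewP]
lemma cc_even (ws : List String) (w : String) (hev : lewP w = true) :
    lewCC (ws ++ [w]) = lewCC ws ++ [PySem.Str.len w] := by
  simp only [lewCC, List.filter_append, List.filter_singleton, hev, cond_true, List.map_append, List.map_cons, List.map_nil]
lemma cc_odd (ws : List String) (w : String) (hev : lewP w = false) :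
    lewCC (ws ++ [w]) = lewCC ws := by
  simp only [lewCC, List.filter_append, List.filter_singleton, hev, cond_false, List.append_nil]
lemma even_max {ws : List String} {m : Int}
    (h : PySem.List.max? (lewCC ws) (fun x => x) = some m) :
    PySem.Int.mod m 2 = 0 := by
  rcases List.mem_map.mp (PySem.List.max?_mem h) with ⟨u, hu, hlu⟩
  have hev := (List.mem_filter.mp hu).2
  rw [← hlu]
  exact (lewP_iff u).mp hev
lemma le_max {ws : List String} {m : Int} (h : PySem.List.max? (lewCC ws) (fun x => x) = some m)
    {u : String} (hu : u ∈ ws) (huev : lewP u = true) : PySem.Str.len u ≤ m :=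
  PySem.List.max?_isMax h _ (List.mem_map.mpr ⟨u, List.mem_filter.mpr ⟨hu, huev⟩, rfl⟩)
lemma step_odd {w : String} (hev : lewP w = false) (b : Option String) : lewStep b w = b := by
  have : (PySem.Int.mod (PySem.Str.len w) 2 == 0) = false := by simpa [lewP] using hev
  simp only [lewStep, this, Bool.false_and, Bool.false_eq_true, if_false]

lemma lew_step_eq (ws : List String) (w : String) :
    lewStep (lewA ws) w = lewA (ws ++ [w]) := by
  by_cases hev : lewP w = true
  case neg =>
    have hev' : lewP w = false := by revert hev; cases lewP w <;> simp
    unfold lewA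
    rw [cc_odd ws w hev']
    rcases hmax : PySem.List.max? (lewCC ws) (fun x : Int => x) with _ | m
    · dsimp only
      exact step_odd hev' none
    · have hmeven := even_max hmax
      have hqw : (fun v => PySem.Str.len v == m) w = false := by
        simp only [beq_eq_false_iff_ne, ne_eq]
        intro h
        exact hev ((lewP_iff w).mpr (h ▸ hmeven))
      dsimp only
      rw [step_odd hev', List.find?_append, List.find?_singleton]
      have hne : ¬((w.length : Int) = m) := by simpa [lew_len] using hqw
      simp [hne]
  case pos =>
    have hevb : (PySem.Int.mod (PySem.Str.len w) 2 == 0) = true := by simpa [lewP] using hev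
    unfold lewA
    rw [cc_even ws w hev]
    rcases hmax : PySem.List.max? (lewCC ws) (fun x : Int => x) with _ | m
    · have hnil : lewCC ws = [] := (PySem.List.max?_eq_none_iff _ _).mp hmax
      have hfil : ws.filter lewP = [] := List.map_eq_nil_iff.mp hnil
      rw [hnil]
      have hmax1 : PySem.List.max? (([] : List Int) ++ [PySem.Str.len w]) (fun x : Int => x) = some (PySem.Str.len w) := rfl
      rw [hmax1]
      dsimp only
      have hnone : ws.find? (fun u => PySem.Str.len u == PySem.Str.len w) = none := by
        rw [List.find?_eq_none]
        intro u hu hq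
        have heq : PySem.Str.len u = PySem.Str.len w := by simpa using hq
        have huev : lewP u = true := (lewP_iff u).mpr (by rw [heq]; exact (lewP_iff w).mp hev)
        have : u ∈ ws.filter lewP := List.mem_filter.mpr ⟨hu, huev⟩
        rw [hfil] at this
        simp at this
      rw [List.find?_append, hnone]
      simp only [lewStep, hevb, Bool.true_and, Option.none_or, List.find?_singleton]
      simp
    · rcases List.mem_map.mp (PySem.List.max?_mem hmax) with ⟨u0, hu0, hlu0⟩
      have hfind : (ws.find? (fun v => PySem.Str.len v == m)).isSome := by
        rw [List.find?_isSome]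
        exact ⟨u0, (List.mem_filter.mp hu0).1, by simp only [beq_iff_eq]; exact hlu0⟩
      rcases Option.isSome_iff_exists.mp hfind with ⟨b, hb⟩
      have hlb : PySem.Str.len b = m := by simpa using List.find?_some hb
      rcases hmax2 : PySem.List.max? (lewCC ws ++ [PySem.Str.len w]) (fun x : Int => x) with _ | m'
      · exact absurd ((PySem.List.max?_eq_none_iff _ _).mp hmax2) (by simp)
      have hm'max := PySem.List.max?_isMax hmax2
      have hmle : m ≤ m' := hm'max _ (by simpa using Or.inl (PySem.List.max?_mem hmax))
      have hwle : PySem.Str.len w ≤ m' := hm'max _ (by simp)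
      have hm'ub : m' ≤ m ∨ m' = PySem.Str.len w := by
        rcases List.mem_append.mp (PySem.List.max?_mem hmax2) with h | h
        · left; exact PySem.List.max?_isMax hmax _ h
        · right; simpa using h
      by_cases hgt : m < PySem.Str.len w
      · have hm' : m' = PySem.Str.len w := by omega
        subst hm'
        have hnone : ws.find? (fun u => PySem.Str.len u == PySem.Str.len w) = none := by
          rw [List.find?_eq_none]
          intro u hu hq
          have heq : PySem.Str.len u = PySem.Str.len w := by simpa using hq
          have huev : lewP u = true := (lewP_iff u).mpr (by rw [heq]; exact (lewP_iff w).mp hev)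
          have := le_max hmax hu huev
          omega
        dsimp only
        rw [hb, List.find?_append, hnone]
        simp only [lewStep, hevb, Bool.true_and, hlb, Option.none_or, List.find?_singleton]
        rw [lew_len] at hgt
        simp [hgt]
      · have hm' : m' = m := by omega
        subst hm'
        dsimp only
        rw [hb, List.find?_append, hb]
        simp only [lewStep, hevb, Bool.true_and, hlb, Option.some_or]
        rw [lew_len] at hgt
        simp [hgt]


lemma lew_fold (ws : List String) : ws.foldl lewStep none = lewA ws := by
  induction ws using List.reverseRecOn with
  | nil => rfl
  | append_singleton ws w ih =>
    rw [List.foldl_append, List.foldl_cons, List.foldl_nil, ih, lew_step_eq]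

lemma portA_eq (s : String) :
    longestEvenWord s = match lewA (PySem.Str.split₀ s) with
      | some w => w
      | none => "00" := by
  unfold longestEvenWord lewA
  dsimp only
  rw [show ((PySem.Str.split₀ s).filter (fun w => PySem.Int.mod (PySem.Str.len w) 2 == 0)).map
      (fun w => PySem.Str.len w) = lewCC (PySem.Str.split₀ s) from rfl]
  by_cases h : (lewCC (PySem.Str.split₀ s)).length = 0
  · have hnil : lewCC (PySem.Str.split₀ s) = [] := List.length_eq_zero_iff.mp h
    have hm : PySem.List.max? (lewCC (PySem.Str.split₀ s)) (fun x : Int => x) = none :=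
      (PySem.List.max?_eq_none_iff _ _).mpr hnil
    rw [if_pos h, hm]
  · rw [if_neg h]
    rcases hm : PySem.List.max? (lewCC (PySem.Str.split₀ s)) (fun x : Int => x) with _ | m
    · have := (PySem.List.max?_eq_none_iff (lewCC (PySem.Str.split₀ s)) (fun x : Int => x)).mp hm
      simp [this] at h
    · rfl

-- ===== VERDICT (by name: the statement is the Claim_ definition above) =====
theorem longestEvenWord_spec : Claim_equal_longestEvenWord := by
  intro s _
  unfold Spec_longestEvenWord longestEvenWord_alt
  rw [lew_fold, portA_eq]
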